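-- pv_equiv track=rewrite | github.com/zadnap/parabox | helpers.py | format_created_at
-- ===== SOURCE A (Python) =====
-- def format_created_at(created_at_day, created_at_second):
--     created_at = 'Just now'
--     if created_at_day < 1:
--         created_at_dict = {
--             'second': int(created_at_second),
--             'min': int(created_at_second / 60),
--             'hour': int(created_at_second / 3600),
--         }
--
--         for key, value in created_at_dict.items():
--             if value == 0:
--                 break
--             created_at = f"{value} " + (key if value == 1 else key + 's') + ' ago'
--     else:
--         created_at_dict = {
--             'day': int(created_at_day),
--             'week': int(created_at_day / 7),
--             'month': int(created_at_day / 30),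
--             'year': int(created_at_day / 365)
--         }
--
--         for key, value in created_at_dict.items():
--             if value == 0:
--                 break
--             created_at = f"{value} " + (key if value == 1 else key + 's') + ' ago'
--
--     return created_at
-- ===== SOURCE B (Python) =====
-- def format_created_at(created_at_day, created_at_second):
--     def phrase(value, unit):
--         return f"{value} " + (unit if value == 1 else unit + 's') + ' ago'
--
--     if created_at_day < 1:
--         hour = int(created_at_second / 3600)
--         if hour:
--             return phrase(hour, 'hour')
--         minute = int(created_at_second / 60)
--         if minute:
--             return phrase(minute, 'min')
--         second = int(created_at_second)
--         if second:
--             return phrase(second, 'second')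
--         return 'Just now'
--
--     year = int(created_at_day / 365)
--     if year:
--         return phrase(year, 'year')
--     month = int(created_at_day / 30)
--     if month:
--         return phrase(month, 'month')
--     week = int(created_at_day / 7)
--     if week:
--         return phrase(week, 'week')
--     return phrase(created_at_day, 'day')
-- ===== Notes on version B (the rewrite author's own statement) =====
-- stated objective: simpler
-- what changed: Replaced A's two dicts iterated smallest-unit-first with overwrite-and-break by a largest-unit-first conditional chain that returns the first nonzero unit directly.
import Mathlib
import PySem

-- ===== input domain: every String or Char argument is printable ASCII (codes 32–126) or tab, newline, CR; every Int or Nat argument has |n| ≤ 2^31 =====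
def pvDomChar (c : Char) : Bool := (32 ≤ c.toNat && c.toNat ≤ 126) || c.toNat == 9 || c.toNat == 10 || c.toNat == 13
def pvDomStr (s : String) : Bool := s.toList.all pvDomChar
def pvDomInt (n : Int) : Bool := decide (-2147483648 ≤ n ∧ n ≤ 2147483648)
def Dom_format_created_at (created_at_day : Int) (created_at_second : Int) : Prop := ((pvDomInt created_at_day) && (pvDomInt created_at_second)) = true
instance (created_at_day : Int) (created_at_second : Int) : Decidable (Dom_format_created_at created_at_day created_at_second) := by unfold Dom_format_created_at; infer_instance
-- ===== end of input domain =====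

-- B replaces A's two dict+forward-loop-with-break passes by a largest-unit-first conditional chain (objective: simpler).

-- ===== PORT A =====
-- the f-string body built on each loop iteration of A
def pvEntryA (key : String) (value : Int) : String :=
  PySem.Int.toStr value ++ " " ++ (if value = 1 then key else key ++ "s") ++ " ago"

-- 'for key, value in created_at_dict.items(): if value == 0: break; created_at = …'
def pvItemsLoopA : String → List (String × Int) → String
  | created_at, [] => created_at
  | created_at, (key, value) :: rest =>
    if value = 0 then created_at
    else pvItemsLoopA (pvEntryA key value) rest

-- int(x) of an int is the identity; int(x/60) etc. truncate toward zero, which is Int.tdiv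
-- (exact on Dom: |x| ≤ 2^31, so the float-division error is far below 1/3600 of an integer boundary)
def format_created_at (created_at_day : Int) (created_at_second : Int) : String :=
  if created_at_day < 1 then
    pvItemsLoopA "Just now"
      [("second", created_at_second),
       ("min", created_at_second.tdiv 60),
       ("hour", created_at_second.tdiv 3600)]
  else
    pvItemsLoopA "Just now"
      [("day", created_at_day),
       ("week", created_at_day.tdiv 7),
       ("month", created_at_day.tdiv 30),
       ("year", created_at_day.tdiv 365)]

-- ===== PORT B =====
def pvPhraseB (value : Int) (unit : String) : String :=
  PySem.Int.toStr value ++ " " ++ (if value = 1 then unit else unit ++ "s") ++ " ago"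

-- int(x/3600) etc. truncate toward zero = Int.tdiv (exact on Dom, same note as in port A)
def format_created_at_alt (created_at_day : Int) (created_at_second : Int) : String :=
  if created_at_day < 1 then
    let hour := created_at_second.tdiv 3600
    if hour ≠ 0 then pvPhraseB hour "hour"
    else
      let minute := created_at_second.tdiv 60
      if minute ≠ 0 then pvPhraseB minute "min"
      else if created_at_second ≠ 0 then pvPhraseB created_at_second "second"
      else "Just now"
  else
    let year := created_at_day.tdiv 365
    if year ≠ 0 then pvPhraseB year "year"
    else
      let month := created_at_day.tdiv 30
      if month ≠ 0 then pvPhraseB month "month"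
      else
        let week := created_at_day.tdiv 7
        if week ≠ 0 then pvPhraseB week "week"
        else pvPhraseB created_at_day "day"

-- ===== PRECONDITION & SPEC =====
def Spec_format_created_at (created_at_day : Int) (created_at_second : Int) (out : String) : Prop := out = format_created_at_alt created_at_day created_at_second
instance (created_at_day : Int) (created_at_second : Int) (out : String) : Decidable (Spec_format_created_at created_at_day created_at_second out) := by unfold Spec_format_created_at; infer_instance

-- ===== CLAIM (what is proved, stated in full; the proofs are below) =====
def Claim_equal_format_created_at : Prop := ∀ (created_at_day : Int) (created_at_second : Int), Dom_format_created_at created_at_day created_at_second → Spec_format_created_at created_at_day created_at_second (format_created_at created_at_day created_at_second)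

-- ===== LEMMAS AND PROOFS =====

-- truncating division expressed through Euclidean division, one if per sign
theorem pv_tdiv_if (a b : Int) (_hb : 0 < b) :
    a.tdiv b = if 0 ≤ a then a / b else -((-a) / b) := by
  by_cases h : 0 ≤ a
  · rw [if_pos h, Int.tdiv_eq_ediv_of_nonneg h]
  · rw [if_neg h]
    have h2 : a.tdiv b = -((-a).tdiv b) := by rw [Int.neg_tdiv, neg_neg]
    rw [h2, Int.tdiv_eq_ediv_of_nonneg (by omega)]

-- ===== VERDICT (by name: the statement is the Claim_ definition above) =====
set_option maxHeartbeats 1000000 in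
theorem format_created_at_spec : Claim_equal_format_created_at := by
  intro d s _
  unfold Spec_format_created_at format_created_at format_created_at_alt
  by_cases hd : d < 1
  · simp only [if_pos hd, pvItemsLoopA, pvEntryA, pvPhraseB,
      pv_tdiv_if s 60 (by norm_num), pv_tdiv_if s 3600 (by norm_num)]
    split_ifs <;> first | rfl | omega
  · simp only [if_neg hd, pvItemsLoopA, pvEntryA, pvPhraseB,
      pv_tdiv_if d 7 (by norm_num), pv_tdiv_if d 30 (by norm_num),
      pv_tdiv_if d 365 (by norm_num)]
    split_ifs <;> first | rfl | omega
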